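-- pv_equiv track=rewrite | github.com/lawson89/aoc2022 | exercise8/ex8.py | analyze_slice_visibility
-- ===== SOURCE A (Python) =====
-- def analyze_slice_visibility(slice_to_analyze: [], my_height: int):
--     visibility_slice = [0] * len(slice_to_analyze)
--     blocked = False
--     for idx, val in enumerate(slice_to_analyze):
--         if blocked:
--             visibility_slice[idx] = 0
--             continue
--         if val < my_height:
--             visibility_slice[idx] = 1
--         else:
--             visibility_slice[idx] = 1
--             blocked = True
--     return visibility_slice
-- ===== SOURCE B (Python) =====
-- def analyze_slice_visibility(slice_to_analyze: [], my_height: int):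
--     n = len(slice_to_analyze)
--     cut = next((i for i, v in enumerate(slice_to_analyze) if v >= my_height), None)
--     if cut is None:
--         return [1] * n
--     return [1] * (cut + 1) + [0] * (n - cut - 1)
-- ===== Notes on version B (the rewrite author's own statement) =====
-- stated objective: simpler
-- what changed: Replaces A's per-index marking loop with a mutable array and a running blocked flag by finding the first blocker's index and constructing the mask directly as [1]*(cut+1)+[0]*(rest).
import Mathlib
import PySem

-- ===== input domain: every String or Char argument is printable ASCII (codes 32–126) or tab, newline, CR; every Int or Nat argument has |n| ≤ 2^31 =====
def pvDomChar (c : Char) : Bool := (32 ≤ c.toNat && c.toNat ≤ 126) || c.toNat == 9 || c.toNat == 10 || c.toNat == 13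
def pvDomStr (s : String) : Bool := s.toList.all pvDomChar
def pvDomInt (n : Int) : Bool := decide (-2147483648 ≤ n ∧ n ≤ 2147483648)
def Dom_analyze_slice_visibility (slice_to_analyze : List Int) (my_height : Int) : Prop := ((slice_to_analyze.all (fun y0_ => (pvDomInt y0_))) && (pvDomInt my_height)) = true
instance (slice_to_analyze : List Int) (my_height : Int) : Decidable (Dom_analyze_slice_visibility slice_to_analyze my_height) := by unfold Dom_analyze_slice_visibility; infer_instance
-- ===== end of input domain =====

-- B replaces A's per-index marking loop (mutable list + blocked flag) by finding
-- the first blocking index and constructing the mask directly (objective: simpler).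

-- ===== PORT A =====
-- Literal transliteration of A: zero-initialised list, then in-order writes
-- visibility_slice[idx] driven by a `blocked` flag, via a fold over enumerate.
-- pvStepA is the loop body of A, one iteration of the for-loop.
def pvStepA (my_height : Int) (st : List Int × Bool) (p : Int × Int) : List Int × Bool :=
  let (vis, blocked) := st
  if blocked then (vis.set p.1.toNat 0, blocked)
  else if p.2 < my_height then (vis.set p.1.toNat 1, blocked)
  else (vis.set p.1.toNat 1, true)

def analyze_slice_visibility (slice_to_analyze : List Int) (my_height : Int) : List Int :=
  let visibility_slice : List Int := List.replicate slice_to_analyze.length 0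
  (List.foldl (pvStepA my_height) (visibility_slice, false)
    (PySem.List.enumerate slice_to_analyze)).1

-- ===== PORT B =====
-- B: find the cutoff index of the first element ≥ my_height, then build the
-- mask directly by concatenating runs of ones and zeros.
def analyze_slice_visibility_alt (slice_to_analyze : List Int) (my_height : Int) : List Int :=
  let n := slice_to_analyze.length
  match slice_to_analyze.findIdx? (fun v => my_height ≤ v) with
  | none => List.replicate n 1
  | some cut => List.replicate (cut + 1) 1 ++ List.replicate (n - cut - 1) 0

-- ===== PRECONDITION & SPEC =====
def Spec_analyze_slice_visibility (slice_to_analyze : List Int) (my_height : Int) (out : List Int) : Prop := out = analyze_slice_visibility_alt slice_to_analyze my_height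
instance (slice_to_analyze : List Int) (my_height : Int) (out : List Int) : Decidable (Spec_analyze_slice_visibility slice_to_analyze my_height out) := by unfold Spec_analyze_slice_visibility; infer_instance

-- ===== CLAIM (what is proved, stated in full; the proofs are below) =====
def Claim_equal_analyze_slice_visibility : Prop := ∀ (slice_to_analyze : List Int) (my_height : Int), Dom_analyze_slice_visibility slice_to_analyze my_height → Spec_analyze_slice_visibility slice_to_analyze my_height (analyze_slice_visibility slice_to_analyze my_height)

-- ===== LEMMAS AND PROOFS =====

-- pvMask h l b: the visibility values A writes for the remaining elements l
-- when the blocked flag currently is b.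
def pvMask (h : Int) : List Int → Bool → List Int
  | [], _ => []
  | v :: t, b => if b then 0 :: pvMask h t true
                 else if v < h then 1 :: pvMask h t false
                 else 1 :: pvMask h t true

theorem pvMask_true (h : Int) (l : List Int) : pvMask h l true = List.replicate l.length 0 := by
  induction l with
  | nil => rfl
  | cons v t ih => simp [pvMask, ih, List.replicate_succ]

theorem take_succ_set {α : Type} (vis : List α) (k : Nat) (x : α) (hk : k < vis.length) :
    (vis.set k x).take (k + 1) = vis.take k ++ [x] := by
  apply List.ext_getElem
  · simp; omega
  · intro i hi1 hi2
    rw [List.getElem_take, List.getElem_set]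
    by_cases hik : i = k
    · subst hik
      rw [List.getElem_append_right (by simp)]
      simp
    · have hlt : i < k := by
        have : i < min (k + 1) ((vis.set k x).length) := by simpa using hi1
        simp at this; omega
      rw [List.getElem_append_left (by simp; omega)]
      rw [if_neg (by omega)]
      simp

theorem foldlA_eq_mask (h : Int) (l : List Int) :
    ∀ (k : Nat) (vis : List Int) (b : Bool), vis.length = k + l.length →
    (List.foldl (pvStepA h) (vis, b) (PySem.List.enumerate l (k : Int))).1 =
      vis.take k ++ pvMask h l b := by
  induction l with
  | nil =>
    intro k vis b hlen
    simp at hlen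
    simp [PySem.List.enumerate_nil, pvMask, List.take_of_length_le (le_of_eq hlen)]
  | cons v t ih =>
    intro k vis b hlen
    have hk : k < vis.length := by simp at hlen; omega
    have hlen' : ∀ x : Int, (vis.set k x).length = (k + 1) + t.length := by
      intro x; simp at hlen ⊢; omega
    rw [PySem.List.enumerate_cons, List.foldl_cons]
    cases b with
    | false =>
      by_cases hv : v < h
      · have ihx := ih (k + 1) (vis.set k 1) false (hlen' 1)
        push_cast at ihx
        simp only [pvStepA, Int.toNat_natCast, hv, if_true, if_false, Bool.false_eq_true]
        rw [ihx, take_succ_set vis k 1 hk]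
        simp [pvMask, hv]
      · have ihx := ih (k + 1) (vis.set k 1) true (hlen' 1)
        push_cast at ihx
        simp only [pvStepA, Int.toNat_natCast, hv, if_false, Bool.false_eq_true]
        rw [ihx, take_succ_set vis k 1 hk]
        simp [pvMask, hv]
    | true =>
      have ihx := ih (k + 1) (vis.set k 0) true (hlen' 0)
      push_cast at ihx
      simp only [pvStepA, Int.toNat_natCast, if_true]
      rw [ihx, take_succ_set vis k 0 hk]
      simp [pvMask]

theorem alt_eq_mask (h : Int) (l : List Int) :
    analyze_slice_visibility_alt l h = pvMask h l false := by
  induction l with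
  | nil => rfl
  | cons v t ih =>
    by_cases hv : h ≤ v
    · simp [analyze_slice_visibility_alt, List.findIdx?_cons, hv, pvMask, not_lt.mpr hv,
        pvMask_true, List.replicate_succ]
    · have hv' : v < h := lt_of_not_ge hv
      simp only [analyze_slice_visibility_alt, List.findIdx?_cons, decide_eq_true_eq] at ih ⊢
      cases hfi : t.findIdx? (fun v => decide (h ≤ v)) with
      | none =>
        simp [hfi] at ih
        simp [hv, pvMask, hv', ← ih, List.replicate_succ]
      | some cut =>
        simp [hfi] at ih
        simp [hv, pvMask, hv', ← ih, List.replicate_succ]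

-- ===== VERDICT (by name: the statement is the Claim_ definition above) =====
theorem analyze_slice_visibility_spec : Claim_equal_analyze_slice_visibility := by
  intro s h _
  unfold Spec_analyze_slice_visibility
  show (List.foldl (pvStepA h) (List.replicate s.length 0, false)
      (PySem.List.enumerate s ((0 : Nat) : Int))).1 = analyze_slice_visibility_alt s h
  rw [foldlA_eq_mask h s 0 (List.replicate s.length 0) false (by simp), alt_eq_mask]
  simp
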